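-- pv_equiv track=rewrite | github.com/dair-iitd/fill-in-the-blank-mwp | math_infilling/check_num.py | check_eq
-- ===== SOURCE A (Python) =====
-- def check_eq(num1, num2):
--     number=['1','2','3','4','5','6','7','8','9', '1/2']
--     word=['one', 'two', 'three', 'four', 'five', 'six', 'seven', 'eight', 'nine', 'half']
--     if num1[0]=='$' or num1[0]=='(':
--         num1=num1[1:]
--     if num2[0]=='$':
--         num2=num2[1:]
--     if num1[-1]=='.' or num1[-1]==',':
--         num1=num1[:-1]
--     if num2[-1]=='.' or num2[-1]==',':
--         num2=num2[:-1]
--     if num1==num2: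
--        return 1
--
--     else:
--         for i in range(len(number)):
--             if (num1==number[i] and num2==word[i]) or \
--             (num1==word[i] and num2==number[i]):
--                 return 1
--
--         return 0
-- ===== SOURCE B (Python) =====
-- WORD2NUM = {'one': '1', 'two': '2', 'three': '3', 'four': '4', 'five': '5',
--             'six': '6', 'seven': '7', 'eight': '8', 'nine': '9', 'half': '1/2'}
--
-- def check_eq(num1, num2):
--     if num1.startswith('$') or num1.startswith('('):
--         num1 = num1[1:]
--     if num2.startswith('$'):
--         num2 = num2[1:]
--     if num1.endswith('.') or num1.endswith(','):
--         num1 = num1[:-1]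
--     if num2.endswith('.') or num2.endswith(','):
--         num2 = num2[:-1]
--     n1 = WORD2NUM.get(num1, num1)
--     n2 = WORD2NUM.get(num2, num2)
--     return 1 if n1 == n2 else 0
-- ===== Notes on version B (the rewrite author's own statement) =====
-- stated objective: simpler
-- what changed: B canonicalizes each token through one word-to-digit dict and compares once, replacing A's direct-equality check plus indexed pairwise scan over two parallel lists; B's startswith/endswith normalization also never raises on empty or single-sigil tokens.
import Mathlib
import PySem

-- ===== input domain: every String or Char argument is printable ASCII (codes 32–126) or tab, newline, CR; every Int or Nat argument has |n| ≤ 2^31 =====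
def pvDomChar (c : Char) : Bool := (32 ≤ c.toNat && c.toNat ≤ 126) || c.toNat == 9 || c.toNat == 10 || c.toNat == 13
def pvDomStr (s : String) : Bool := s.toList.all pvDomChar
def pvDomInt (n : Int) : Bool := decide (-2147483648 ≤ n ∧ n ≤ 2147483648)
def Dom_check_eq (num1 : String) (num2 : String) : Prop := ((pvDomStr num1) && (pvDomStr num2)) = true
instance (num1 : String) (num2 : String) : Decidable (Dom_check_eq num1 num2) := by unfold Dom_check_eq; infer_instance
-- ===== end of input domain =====

-- B canonicalizes each token through one word→digit dict and compares once, instead of A's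
-- direct-equality check plus indexed scan over two parallel lists (objective: simpler).

-- ===== PORT A =====
def pvNumber : List String := ["1","2","3","4","5","6","7","8","9","1/2"]
def pvWord : List String := ["one","two","three","four","five","six","seven","eight","nine","half"]

-- A's `for i in range(len(number))` loop with early `return 1`, falling through to `return 0`
def pvLoopA (num1 num2 : String) : List Int → Int
  | [] => 0
  | i :: is =>
    if (num1 = PySem.List.pyGetD pvNumber i "" ∧ num2 = PySem.List.pyGetD pvWord i "") ∨
       (num1 = PySem.List.pyGetD pvWord i "" ∧ num2 = PySem.List.pyGetD pvNumber i "") then 1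
    else pvLoopA num1 num2 is

def check_eq (num1 : String) (num2 : String) : Int :=
  let num1 := if PySem.Str.pyGet? num1 0 = some '$' ∨ PySem.Str.pyGet? num1 0 = some '(' then
      PySem.Str.slice num1 (some 1) none else num1
  let num2 := if PySem.Str.pyGet? num2 0 = some '$' then
      PySem.Str.slice num2 (some 1) none else num2
  let num1 := if PySem.Str.pyGet? num1 (-1) = some '.' ∨ PySem.Str.pyGet? num1 (-1) = some ',' then
      PySem.Str.slice num1 none (some (-1)) else num1
  let num2 := if PySem.Str.pyGet? num2 (-1) = some '.' ∨ PySem.Str.pyGet? num2 (-1) = some ',' then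
      PySem.Str.slice num2 none (some (-1)) else num2
  if num1 = num2 then 1
  else pvLoopA num1 num2 (PySem.List.pyRange 0 (pvNumber.length) 1)

-- ===== PORT B =====
def pvWord2Num : PySem.Dict String String := PySem.Dict.ofList [("one","1"),("two","2"),("three","3"),("four","4"),("five","5"),("six","6"),("seven","7"),("eight","8"),("nine","9"),("half","1/2")]

def check_eq_alt (num1 : String) (num2 : String) : Int :=
  let num1 := if PySem.Str.startswith num1 "$" ∨ PySem.Str.startswith num1 "(" then
      PySem.Str.slice num1 (some 1) none else num1
  let num2 := if PySem.Str.startswith num2 "$" then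
      PySem.Str.slice num2 (some 1) none else num2
  let num1 := if PySem.Str.endswith num1 "." ∨ PySem.Str.endswith num1 "," then
      PySem.Str.slice num1 none (some (-1)) else num1
  let num2 := if PySem.Str.endswith num2 "." ∨ PySem.Str.endswith num2 "," then
      PySem.Str.slice num2 none (some (-1)) else num2
  let n1 := PySem.Dict.getD pvWord2Num num1 num1
  let n2 := PySem.Dict.getD pvWord2Num num2 num2
  if n1 = n2 then 1 else 0

-- ===== PRECONDITION & SPEC =====
-- Pre_ excludes exactly the inputs where Python A raises IndexError: an empty token, or a
-- token that is only a stripped sigil ('$' or '(' for num1, '$' for num2) and strips to ''.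
def Pre_check_eq (num1 : String) (num2 : String) : Prop :=
  num1 ≠ "" ∧ num2 ≠ "" ∧ num1 ≠ "$" ∧ num1 ≠ "(" ∧ num2 ≠ "$"
instance (num1 : String) (num2 : String) : Decidable (Pre_check_eq num1 num2) := by
  unfold Pre_check_eq; infer_instance

def pvWitness_check_eq : String × String := ("$1", "one")

def Spec_check_eq (num1 : String) (num2 : String) (out : Int) : Prop := out = check_eq_alt num1 num2
instance (num1 : String) (num2 : String) (out : Int) : Decidable (Spec_check_eq num1 num2 out) := by
  unfold Spec_check_eq; infer_instance

-- ===== CLAIM (what is proved, stated in full; the proofs are below) =====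
def Claim_equal_check_eq : Prop := ∀ (num1 : String) (num2 : String), Dom_check_eq num1 num2 → Pre_check_eq num1 num2 → Spec_check_eq num1 num2 (check_eq num1 num2)

-- ===== LEMMAS AND PROOFS =====

-- A's `s[0] == c` test agrees with B's `s.startswith(c)` on every string
lemma pyGet0_eq_startswith (s : String) (c : Char) :
    (PySem.Str.pyGet? s 0 = some c) = (PySem.Str.startswith s (String.ofList [c]) = true) := by
  simp only [pysem, PySem.Chars.startswith_iff]
  cases h : s.toList with
  | nil => simp
  | cons a t => simp [List.prefix_cons_iff]; exact ⟨Eq.symm, Eq.symm⟩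

-- A's `s[-1] == c` test agrees with B's `s.endswith(c)` on every string
lemma pyGetNeg1_eq_endswith (s : String) (c : Char) :
    (PySem.Str.pyGet? s (-1) = some c) = (PySem.Str.endswith s (String.ofList [c]) = true) := by
  simp only [pysem, PySem.Chars.endswith_iff, String.toList_ofList]
  induction s.toList using List.reverseRecOn with
  | nil => simp
  | append_singleton t a _ =>
    simp only [List.getLast?_concat, Option.some.injEq, List.suffix_concat_iff, eq_iff_iff]
    constructor
    · rintro rfl; exact Or.inr ⟨[], rfl, List.nil_suffix⟩
    · rintro (h0 | ⟨t1, h1, -⟩)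
      · exact absurd h0 (by simp)
      rcases t1 with - | ⟨x, t2⟩
      · simpa using h1.symm
      · simp at h1

-- B's dict lookup written as an if-chain over the ten words
set_option maxHeartbeats 1000000 in
lemma getD_word2num (n : String) : (pvWord2Num.getD n n) = (if "one" = n then "1" else if "two" = n then "2" else if "three" = n then "3" else if "four" = n then "4" else if "five" = n then "5" else if "six" = n then "6" else if "seven" = n then "7" else if "eight" = n then "8" else if "nine" = n then "9" else if "half" = n then "1/2" else n) := by
  rw [PySem.Dict.getD, show pvWord2Num = PySem.Dict.mk [("one","1"),("two","2"),("three","3"),("four","4"),("five","5"),("six","6"),("seven","7"),("eight","8"),("nine","9"),("half","1/2")] from rfl]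
  simp only [PySem.Dict.get?_mk_cons, beq_iff_eq]
  by_cases h0 : "one" = n
  · rw [← h0]; simp
  rw [if_neg h0, if_neg h0]
  by_cases h1 : "two" = n
  · rw [← h1]; simp
  rw [if_neg h1, if_neg h1]
  by_cases h2 : "three" = n
  · rw [← h2]; simp
  rw [if_neg h2, if_neg h2]
  by_cases h3 : "four" = n
  · rw [← h3]; simp
  rw [if_neg h3, if_neg h3]
  by_cases h4 : "five" = n
  · rw [← h4]; simp
  rw [if_neg h4, if_neg h4]
  by_cases h5 : "six" = n
  · rw [← h5]; simp
  rw [if_neg h5, if_neg h5]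
  by_cases h6 : "seven" = n
  · rw [← h6]; simp
  rw [if_neg h6, if_neg h6]
  by_cases h7 : "eight" = n
  · rw [← h7]; simp
  rw [if_neg h7, if_neg h7]
  by_cases h8 : "nine" = n
  · rw [← h8]; simp
  rw [if_neg h8, if_neg h8]
  by_cases h9 : "half" = n
  · rw [← h9]; simp
  rw [if_neg h9, if_neg h9]
  rfl

-- core: A's direct-equality check plus pairwise scan equals B's normalize-then-compare
set_option maxHeartbeats 4000000 in
lemma core_eq (n1 n2 : String) :
    (if n1 = n2 then (1:Int) else pvLoopA n1 n2 (PySem.List.pyRange 0 (pvNumber.length) 1)) =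
    (if pvWord2Num.getD n1 n1 = pvWord2Num.getD n2 n2 then 1 else 0) := by
  rw [getD_word2num n1, getD_word2num n2,
    show PySem.List.pyRange 0 (pvNumber.length) 1 = [0,1,2,3,4,5,6,7,8,9] by decide]
  by_cases h12 : n1 = n2
  · subst h12; simp
  rw [if_neg h12]
  simp only [pvLoopA,
    show PySem.List.pyGetD pvNumber 0 "" = "1" from rfl, show PySem.List.pyGetD pvWord 0 "" = "one" from rfl,
    show PySem.List.pyGetD pvNumber 1 "" = "2" from rfl, show PySem.List.pyGetD pvWord 1 "" = "two" from rfl,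
    show PySem.List.pyGetD pvNumber 2 "" = "3" from rfl, show PySem.List.pyGetD pvWord 2 "" = "three" from rfl,
    show PySem.List.pyGetD pvNumber 3 "" = "4" from rfl, show PySem.List.pyGetD pvWord 3 "" = "four" from rfl,
    show PySem.List.pyGetD pvNumber 4 "" = "5" from rfl, show PySem.List.pyGetD pvWord 4 "" = "five" from rfl,
    show PySem.List.pyGetD pvNumber 5 "" = "6" from rfl, show PySem.List.pyGetD pvWord 5 "" = "six" from rfl,
    show PySem.List.pyGetD pvNumber 6 "" = "7" from rfl, show PySem.List.pyGetD pvWord 6 "" = "seven" from rfl,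
    show PySem.List.pyGetD pvNumber 7 "" = "8" from rfl, show PySem.List.pyGetD pvWord 7 "" = "eight" from rfl,
    show PySem.List.pyGetD pvNumber 8 "" = "9" from rfl, show PySem.List.pyGetD pvWord 8 "" = "nine" from rfl,
    show PySem.List.pyGetD pvNumber 9 "" = "1/2" from rfl, show PySem.List.pyGetD pvWord 9 "" = "half" from rfl]
  by_cases hA0 : n1 = "one"
  · subst hA0
    by_cases hB0 : n2 = "one"
    · subst hB0; simp_all
    by_cases hB1 : n2 = "two"
    · subst hB1; simp_all [eq_comm]
    by_cases hB2 : n2 = "three"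
    · subst hB2; simp_all [eq_comm]
    by_cases hB3 : n2 = "four"
    · subst hB3; simp_all [eq_comm]
    by_cases hB4 : n2 = "five"
    · subst hB4; simp_all [eq_comm]
    by_cases hB5 : n2 = "six"
    · subst hB5; simp_all [eq_comm]
    by_cases hB6 : n2 = "seven"
    · subst hB6; simp_all [eq_comm]
    by_cases hB7 : n2 = "eight"
    · subst hB7; simp_all [eq_comm]
    by_cases hB8 : n2 = "nine"
    · subst hB8; simp_all [eq_comm]
    by_cases hB9 : n2 = "half"
    · subst hB9; simp_all [eq_comm]
    simp_all [eq_comm]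
  by_cases hA1 : n1 = "two"
  · subst hA1
    by_cases hB0 : n2 = "one"
    · subst hB0; simp_all [eq_comm]
    by_cases hB1 : n2 = "two"
    · subst hB1; simp_all
    by_cases hB2 : n2 = "three"
    · subst hB2; simp_all [eq_comm]
    by_cases hB3 : n2 = "four"
    · subst hB3; simp_all [eq_comm]
    by_cases hB4 : n2 = "five"
    · subst hB4; simp_all [eq_comm]
    by_cases hB5 : n2 = "six"
    · subst hB5; simp_all [eq_comm]
    by_cases hB6 : n2 = "seven"
    · subst hB6; simp_all [eq_comm]
    by_cases hB7 : n2 = "eight"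
    · subst hB7; simp_all [eq_comm]
    by_cases hB8 : n2 = "nine"
    · subst hB8; simp_all [eq_comm]
    by_cases hB9 : n2 = "half"
    · subst hB9; simp_all [eq_comm]
    simp_all [eq_comm]
  by_cases hA2 : n1 = "three"
  · subst hA2
    by_cases hB0 : n2 = "one"
    · subst hB0; simp_all [eq_comm]
    by_cases hB1 : n2 = "two"
    · subst hB1; simp_all [eq_comm]
    by_cases hB2 : n2 = "three"
    · subst hB2; simp_all
    by_cases hB3 : n2 = "four"
    · subst hB3; simp_all [eq_comm]
    by_cases hB4 : n2 = "five"
    · subst hB4; simp_all [eq_comm]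
    by_cases hB5 : n2 = "six"
    · subst hB5; simp_all [eq_comm]
    by_cases hB6 : n2 = "seven"
    · subst hB6; simp_all [eq_comm]
    by_cases hB7 : n2 = "eight"
    · subst hB7; simp_all [eq_comm]
    by_cases hB8 : n2 = "nine"
    · subst hB8; simp_all [eq_comm]
    by_cases hB9 : n2 = "half"
    · subst hB9; simp_all [eq_comm]
    simp_all [eq_comm]
  by_cases hA3 : n1 = "four"
  · subst hA3
    by_cases hB0 : n2 = "one"
    · subst hB0; simp_all [eq_comm]
    by_cases hB1 : n2 = "two"
    · subst hB1; simp_all [eq_comm]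
    by_cases hB2 : n2 = "three"
    · subst hB2; simp_all [eq_comm]
    by_cases hB3 : n2 = "four"
    · subst hB3; simp_all
    by_cases hB4 : n2 = "five"
    · subst hB4; simp_all [eq_comm]
    by_cases hB5 : n2 = "six"
    · subst hB5; simp_all [eq_comm]
    by_cases hB6 : n2 = "seven"
    · subst hB6; simp_all [eq_comm]
    by_cases hB7 : n2 = "eight"
    · subst hB7; simp_all [eq_comm]
    by_cases hB8 : n2 = "nine"
    · subst hB8; simp_all [eq_comm]
    by_cases hB9 : n2 = "half"
    · subst hB9; simp_all [eq_comm]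
    simp_all [eq_comm]
  by_cases hA4 : n1 = "five"
  · subst hA4
    by_cases hB0 : n2 = "one"
    · subst hB0; simp_all [eq_comm]
    by_cases hB1 : n2 = "two"
    · subst hB1; simp_all [eq_comm]
    by_cases hB2 : n2 = "three"
    · subst hB2; simp_all [eq_comm]
    by_cases hB3 : n2 = "four"
    · subst hB3; simp_all [eq_comm]
    by_cases hB4 : n2 = "five"
    · subst hB4; simp_all
    by_cases hB5 : n2 = "six"
    · subst hB5; simp_all [eq_comm]
    by_cases hB6 : n2 = "seven"
    · subst hB6; simp_all [eq_comm]
    by_cases hB7 : n2 = "eight"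
    · subst hB7; simp_all [eq_comm]
    by_cases hB8 : n2 = "nine"
    · subst hB8; simp_all [eq_comm]
    by_cases hB9 : n2 = "half"
    · subst hB9; simp_all [eq_comm]
    simp_all [eq_comm]
  by_cases hA5 : n1 = "six"
  · subst hA5
    by_cases hB0 : n2 = "one"
    · subst hB0; simp_all [eq_comm]
    by_cases hB1 : n2 = "two"
    · subst hB1; simp_all [eq_comm]
    by_cases hB2 : n2 = "three"
    · subst hB2; simp_all [eq_comm]
    by_cases hB3 : n2 = "four"
    · subst hB3; simp_all [eq_comm]
    by_cases hB4 : n2 = "five"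
    · subst hB4; simp_all [eq_comm]
    by_cases hB5 : n2 = "six"
    · subst hB5; simp_all
    by_cases hB6 : n2 = "seven"
    · subst hB6; simp_all [eq_comm]
    by_cases hB7 : n2 = "eight"
    · subst hB7; simp_all [eq_comm]
    by_cases hB8 : n2 = "nine"
    · subst hB8; simp_all [eq_comm]
    by_cases hB9 : n2 = "half"
    · subst hB9; simp_all [eq_comm]
    simp_all [eq_comm]
  by_cases hA6 : n1 = "seven"
  · subst hA6
    by_cases hB0 : n2 = "one"
    · subst hB0; simp_all [eq_comm]
    by_cases hB1 : n2 = "two"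
    · subst hB1; simp_all [eq_comm]
    by_cases hB2 : n2 = "three"
    · subst hB2; simp_all [eq_comm]
    by_cases hB3 : n2 = "four"
    · subst hB3; simp_all [eq_comm]
    by_cases hB4 : n2 = "five"
    · subst hB4; simp_all [eq_comm]
    by_cases hB5 : n2 = "six"
    · subst hB5; simp_all [eq_comm]
    by_cases hB6 : n2 = "seven"
    · subst hB6; simp_all
    by_cases hB7 : n2 = "eight"
    · subst hB7; simp_all [eq_comm]
    by_cases hB8 : n2 = "nine"
    · subst hB8; simp_all [eq_comm]
    by_cases hB9 : n2 = "half"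
    · subst hB9; simp_all [eq_comm]
    simp_all [eq_comm]
  by_cases hA7 : n1 = "eight"
  · subst hA7
    by_cases hB0 : n2 = "one"
    · subst hB0; simp_all [eq_comm]
    by_cases hB1 : n2 = "two"
    · subst hB1; simp_all [eq_comm]
    by_cases hB2 : n2 = "three"
    · subst hB2; simp_all [eq_comm]
    by_cases hB3 : n2 = "four"
    · subst hB3; simp_all [eq_comm]
    by_cases hB4 : n2 = "five"
    · subst hB4; simp_all [eq_comm]
    by_cases hB5 : n2 = "six"
    · subst hB5; simp_all [eq_comm]
    by_cases hB6 : n2 = "seven"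
    · subst hB6; simp_all [eq_comm]
    by_cases hB7 : n2 = "eight"
    · subst hB7; simp_all
    by_cases hB8 : n2 = "nine"
    · subst hB8; simp_all [eq_comm]
    by_cases hB9 : n2 = "half"
    · subst hB9; simp_all [eq_comm]
    simp_all [eq_comm]
  by_cases hA8 : n1 = "nine"
  · subst hA8
    by_cases hB0 : n2 = "one"
    · subst hB0; simp_all [eq_comm]
    by_cases hB1 : n2 = "two"
    · subst hB1; simp_all [eq_comm]
    by_cases hB2 : n2 = "three"
    · subst hB2; simp_all [eq_comm]
    by_cases hB3 : n2 = "four"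
    · subst hB3; simp_all [eq_comm]
    by_cases hB4 : n2 = "five"
    · subst hB4; simp_all [eq_comm]
    by_cases hB5 : n2 = "six"
    · subst hB5; simp_all [eq_comm]
    by_cases hB6 : n2 = "seven"
    · subst hB6; simp_all [eq_comm]
    by_cases hB7 : n2 = "eight"
    · subst hB7; simp_all [eq_comm]
    by_cases hB8 : n2 = "nine"
    · subst hB8; simp_all
    by_cases hB9 : n2 = "half"
    · subst hB9; simp_all [eq_comm]
    simp_all [eq_comm]
  by_cases hA9 : n1 = "half"
  · subst hA9
    by_cases hB0 : n2 = "one"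
    · subst hB0; simp_all [eq_comm]
    by_cases hB1 : n2 = "two"
    · subst hB1; simp_all [eq_comm]
    by_cases hB2 : n2 = "three"
    · subst hB2; simp_all [eq_comm]
    by_cases hB3 : n2 = "four"
    · subst hB3; simp_all [eq_comm]
    by_cases hB4 : n2 = "five"
    · subst hB4; simp_all [eq_comm]
    by_cases hB5 : n2 = "six"
    · subst hB5; simp_all [eq_comm]
    by_cases hB6 : n2 = "seven"
    · subst hB6; simp_all [eq_comm]
    by_cases hB7 : n2 = "eight"
    · subst hB7; simp_all [eq_comm]
    by_cases hB8 : n2 = "nine"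
    · subst hB8; simp_all [eq_comm]
    by_cases hB9 : n2 = "half"
    · subst hB9; simp_all
    simp_all [eq_comm]
  by_cases hB0 : n2 = "one"
  · subst hB0; simp_all [eq_comm]
  by_cases hB1 : n2 = "two"
  · subst hB1; simp_all [eq_comm]
  by_cases hB2 : n2 = "three"
  · subst hB2; simp_all [eq_comm]
  by_cases hB3 : n2 = "four"
  · subst hB3; simp_all [eq_comm]
  by_cases hB4 : n2 = "five"
  · subst hB4; simp_all [eq_comm]
  by_cases hB5 : n2 = "six"
  · subst hB5; simp_all [eq_comm]
  by_cases hB6 : n2 = "seven"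
  · subst hB6; simp_all [eq_comm]
  by_cases hB7 : n2 = "eight"
  · subst hB7; simp_all [eq_comm]
  by_cases hB8 : n2 = "nine"
  · subst hB8; simp_all [eq_comm]
  by_cases hB9 : n2 = "half"
  · subst hB9; simp_all [eq_comm]
  simp_all [eq_comm]

-- ===== VERDICT (by name: the statement is the Claim_ definition above) =====
theorem check_eq_spec : Claim_equal_check_eq := by
  intro num1 num2 _ _
  unfold Spec_check_eq check_eq check_eq_alt
  simp only [pyGet0_eq_startswith, pyGetNeg1_eq_endswith,
    show String.ofList ['$'] = "$" from rfl, show String.ofList ['('] = "(" from rfl,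
    show String.ofList ['.'] = "." from rfl, show String.ofList [','] = "," from rfl]
  exact core_eq _ _
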